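-- pv_equiv track=rewrite | github.com/LynnHo/AttGAN-Cartoon-Tensorflow | data.py | check_attribute_conflict
-- ===== SOURCE A (Python) =====
-- def check_attribute_conflict(att_batch, att_name, att_names):
--     def _set(att, value, att_name):
--         if att_name in att_names:
--             att[att_names.index(att_name)] = value
--
--     idx = att_names.index(att_name)
--
--     for att in att_batch:
--         if att_name in ['eye_color_0', 'eye_color_1', 'eye_color_2', 'eye_color_3', 'eye_color_4'] and att[idx] == 1:
--             for n in ['eye_color_0', 'eye_color_1', 'eye_color_2', 'eye_color_3', 'eye_color_4']:
--                 if n != att_name: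
--                     _set(att, 0, n)
--         elif att_name in ['face_color_0', 'face_color_1', 'face_color_2', 'face_color_3', 'face_color_4'] and att[idx] == 1:
--             for n in ['face_color_0', 'face_color_1', 'face_color_2', 'face_color_3', 'face_color_4']:
--                 if n != att_name:
--                     _set(att, 0, n)
--         elif att_name in ['hair_color_0', 'hair_color_1', 'hair_color_2', 'hair_color_3', 'hair_color_4'] and att[idx] == 1:
--             for n in ['hair_color_0', 'hair_color_1', 'hair_color_2', 'hair_color_3', 'hair_color_4']:
--                 if n != att_name:
--                     _set(att, 0, n)
--         elif att_name in ['glasses_0', 'glasses_1', 'glasses_2', 'glasses_3', 'glasses_4'] and att[idx] == 1: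
--             for n in ['glasses_0', 'glasses_1', 'glasses_2', 'glasses_3', 'glasses_4']:
--                 if n != att_name:
--                     _set(att, 0, n)
--
--     return att_batch
-- ===== SOURCE B (Python) =====
-- def check_attribute_conflict(att_batch, att_name, att_names):
--     idx = att_names.index(att_name)
--     stem, _, tag = att_name.rpartition('_')
--     if stem in ('eye_color', 'face_color', 'hair_color', 'glasses') and tag in ('0', '1', '2', '3', '4'):
--         siblings = ['%s_%s' % (stem, d) for d in '01234' if d != tag]
--         zero = {att_names.index(n) for n in siblings if n in att_names}
--         return [[0 if j in zero else v for j, v in enumerate(att)] if att[idx] == 1 else att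
--                 for att in att_batch]
--     return att_batch
-- ===== Notes on version B (the rewrite author's own statement) =====
-- stated objective: alternative
-- what changed: Instead of four hard-coded elif branches over 20 literal names with per-row targeted index assignments via a _set helper, B parses att_name with rpartition into a group stem and digit tag, synthesises the sibling names, precomputes the set of column indices to clear, and rebuilds each flagged row with a single enumerate comprehension masking those columns (no in-place mutation; equivalence is about the return value).
import Mathlib
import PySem

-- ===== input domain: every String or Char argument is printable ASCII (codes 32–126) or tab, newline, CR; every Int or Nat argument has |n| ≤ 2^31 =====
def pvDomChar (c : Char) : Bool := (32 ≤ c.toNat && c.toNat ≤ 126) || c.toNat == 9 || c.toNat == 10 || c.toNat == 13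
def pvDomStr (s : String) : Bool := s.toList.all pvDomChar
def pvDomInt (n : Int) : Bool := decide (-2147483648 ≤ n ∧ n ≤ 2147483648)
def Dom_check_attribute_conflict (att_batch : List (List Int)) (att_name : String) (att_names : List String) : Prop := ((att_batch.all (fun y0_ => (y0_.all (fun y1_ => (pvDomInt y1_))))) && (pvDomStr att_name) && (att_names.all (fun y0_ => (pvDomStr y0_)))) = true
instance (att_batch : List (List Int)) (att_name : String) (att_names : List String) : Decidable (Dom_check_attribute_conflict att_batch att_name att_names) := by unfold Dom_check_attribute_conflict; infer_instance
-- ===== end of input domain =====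

-- B replaces A's four hard-coded elif branches (20 literal names, per-row _set index
-- assignments) by parsing att_name into group stem + digit tag via rpartition,
-- synthesising the sibling names, and rebuilding each flagged row with an enumerate
-- mask over a precomputed index set (objective: alternative). A mutates the rows of
-- att_batch in place, B builds fresh rows; the equivalence proved is about the return value.

-- ===== PORT A =====
def pvGrpEye : List String := ["eye_color_0", "eye_color_1", "eye_color_2", "eye_color_3", "eye_color_4"]
def pvGrpFace : List String := ["face_color_0", "face_color_1", "face_color_2", "face_color_3", "face_color_4"]
def pvGrpHair : List String := ["hair_color_0", "hair_color_1", "hair_color_2", "hair_color_3", "hair_color_4"]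
def pvGrpGls : List String := ["glasses_0", "glasses_1", "glasses_2", "glasses_3", "glasses_4"]

-- _set(att, value, att_name): if att_name in att_names: att[att_names.index(att_name)] = value
def pvSetA (att_names : List String) (att : List Int) (value : Int) (name : String) : List Int :=
  if name ∈ att_names then att.set ((PySem.List.index? att_names name).getD 0) value else att

-- for n in <group>: if n != att_name: _set(att, 0, n)
def pvBranchA (att_names : List String) (att_name : String) (g : List String) (att : List Int) : List Int :=
  g.foldl (fun a n => if n ≠ att_name then pvSetA att_names a 0 n else a) att

def check_attribute_conflict (att_batch : List (List Int)) (att_name : String) (att_names : List String) : List (List Int) :=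
  let idx := (PySem.List.index? att_names att_name).getD 0
  att_batch.map (fun att =>
    if att_name ∈ pvGrpEye ∧ att.getD idx 0 = 1 then pvBranchA att_names att_name pvGrpEye att
    else if att_name ∈ pvGrpFace ∧ att.getD idx 0 = 1 then pvBranchA att_names att_name pvGrpFace att
    else if att_name ∈ pvGrpHair ∧ att.getD idx 0 = 1 then pvBranchA att_names att_name pvGrpHair att
    else if att_name ∈ pvGrpGls ∧ att.getD idx 0 = 1 then pvBranchA att_names att_name pvGrpGls att
    else att)

-- ===== PORT B =====
def pvStems : List (List Char) := ["eye_color".toList, "face_color".toList, "hair_color".toList, "glasses".toList]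
def pvDigits : List (List Char) := [['0'], ['1'], ['2'], ['3'], ['4']]

-- hand port of att_name.rpartition('_') for the single-char separator '_' (exact:
-- some (head, tail) splits at the LAST '_'; none is Python's not-found case ('', '', s))
def pvRPart : List Char → Option (List Char × List Char)
  | [] => none
  | c :: t =>
    match pvRPart t with
    | some (a, b) => some (c :: a, b)
    | none => if c = '_' then some ([], t) else none

def check_attribute_conflict_alt (att_batch : List (List Int)) (att_name : String) (att_names : List String) : List (List Int) :=
  let idx := (PySem.List.index? att_names att_name).getD 0
  let p := (pvRPart att_name.toList).getD ([], att_name.toList)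
  if p.1 ∈ pvStems ∧ p.2 ∈ pvDigits then
    let sibs := (['0', '1', '2', '3', '4'].filter (fun d => [d] != p.2)).map
      (fun d => String.ofList (p.1 ++ '_' :: [d]))
    let zero : PySem.Set Int := PySem.Set.ofList ((sibs.filter (fun n => att_names.contains n)).map
      (fun n => (((PySem.List.index? att_names n).getD 0 : Nat) : Int)))
    att_batch.map (fun att =>
      if att.getD idx 0 = 1 then
        (PySem.List.enumerate att).map (fun jv => if jv.1 ∈ zero then 0 else jv.2)
      else att)
  else att_batch

-- ===== PRECONDITION & SPEC =====
-- Pre_ excludes exactly the inputs on which Python A raises: att_name missing from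
-- att_names (ValueError from att_names.index), or a row too short for the index of
-- att_name, or — on a row whose att_name flag is 1 — too short for the index of some
-- other group member present in att_names (IndexError).
def Pre_check_attribute_conflict (att_batch : List (List Int)) (att_name : String) (att_names : List String) : Prop :=
  att_name ∈ att_names ∧
  ∀ g ∈ [pvGrpEye, pvGrpFace, pvGrpHair, pvGrpGls], att_name ∈ g →
    ∀ att ∈ att_batch,
      (PySem.List.index? att_names att_name).getD 0 < att.length ∧
      (att.getD ((PySem.List.index? att_names att_name).getD 0) 0 = 1 →
        ∀ n ∈ g, n ≠ att_name → n ∈ att_names →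
          (PySem.List.index? att_names n).getD 0 < att.length)
instance (att_batch : List (List Int)) (att_name : String) (att_names : List String) : Decidable (Pre_check_attribute_conflict att_batch att_name att_names) := by unfold Pre_check_attribute_conflict; infer_instance

def pvWitness_check_attribute_conflict : List (List Int) × String × List String :=
  ([[1, 0], [0, 1]], "eye_color_0", ["eye_color_0", "eye_color_1"])

def Spec_check_attribute_conflict (att_batch : List (List Int)) (att_name : String) (att_names : List String) (out : List (List Int)) : Prop := out = check_attribute_conflict_alt att_batch att_name att_names
instance (att_batch : List (List Int)) (att_name : String) (att_names : List String) (out : List (List Int)) : Decidable (Spec_check_attribute_conflict att_batch att_name att_names out) := by unfold Spec_check_attribute_conflict; infer_instance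

-- ===== CLAIM (what is proved, stated in full; the proofs are below) =====
def Claim_equal_check_attribute_conflict : Prop := ∀ (att_batch : List (List Int)) (att_name : String) (att_names : List String), Dom_check_attribute_conflict att_batch att_name att_names → Pre_check_attribute_conflict att_batch att_name att_names → Spec_check_attribute_conflict att_batch att_name att_names (check_attribute_conflict att_batch att_name att_names)

-- ===== LEMMAS AND PROOFS =====

-- A's per-row loop over a group equals a fold of set-to-0 over the target indices.
theorem pvBranchA_eq_targets (att_names : List String) (att_name : String) (g : List String) (att : List Int) :
    pvBranchA att_names att_name g att =
      ((g.filter (fun n => n != att_name && att_names.contains n)).map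
        (fun n => (PySem.List.index? att_names n).getD 0)).foldl (fun a j => a.set j 0) att := by
  induction g generalizing att with
  | nil => rfl
  | cons n t ih =>
    have ih' := fun a => ih a
    by_cases hn : n = att_name
    · simp [pvBranchA, hn] at *
      exact ih' att
    · by_cases hm : n ∈ att_names
      · simpa [pvBranchA, List.filter_cons, hn, hm, pvSetA] using
          ih' (att.set ((PySem.List.index? att_names n).getD 0) 0)
      · simpa [pvBranchA, List.filter_cons, hn, hm, pvSetA] using ih' att

-- pvRPart reconstructs its input around the separator.
theorem pvRPart_reconstruct : ∀ (s a b : List Char), pvRPart s = some (a, b) → s = a ++ '_' :: b := by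
  intro s
  induction s with
  | nil => intro a b h; simp [pvRPart] at h
  | cons c t ih =>
    intro a b h
    simp only [pvRPart] at h
    cases hp : pvRPart t with
    | some p =>
      obtain ⟨a', b'⟩ := p
      rw [hp] at h
      simp only [Option.some.injEq, Prod.mk.injEq] at h
      obtain ⟨ha, hb⟩ := h
      subst ha; subst hb
      simp [ih a' b' hp]
    | none =>
      rw [hp] at h
      by_cases hc : c = '_'
      · subst hc
        rw [if_pos rfl] at h
        injection h with h'
        injection h' with h1 h2
        subst h1; subst h2
        simp
      · simp [hc] at h

-- folding set-to-0 over a list of indices equals a mask over the enumerated row.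
theorem foldl_set_eq_enum_mask (T : List Nat) (att : List Int) :
    T.foldl (fun a j => a.set j (0 : Int)) att
      = (PySem.List.enumerate att).map (fun jv => if jv.1 ∈ T.map (fun n => (n : Int)) then 0 else jv.2) := by
  induction T generalizing att with
  | nil => simp [PySem.List.map_snd_enumerate]
  | cons j T ih =>
    rw [List.foldl_cons, ih]
    refine List.ext_getElem ?_ ?_
    · simp [PySem.List.length_enumerate]
    · intro k hk1 hk2
      simp only [List.getElem_map, PySem.List.getElem_enumerate, List.getElem_set, zero_add]
      by_cases hjk : k = j
      · subst hjk
        simp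
      · simp [hjk, Ne.symm hjk]

-- A's branch over group g equals B's enumerate mask built from the sibling names.
theorem pvRow_eq (att_names : List String) (att_name : String) (g sibs : List String)
    (hs : sibs = g.filter (fun n => n != att_name)) (att : List Int) :
    pvBranchA att_names att_name g att =
      (PySem.List.enumerate att).map (fun jv =>
        if jv.1 ∈ PySem.Set.ofList ((sibs.filter (fun n => att_names.contains n)).map
            (fun n => (((PySem.List.index? att_names n).getD 0 : Nat) : Int))) then 0 else jv.2) := by
  subst hs
  rw [pvBranchA_eq_targets, foldl_set_eq_enum_mask]
  refine List.map_congr_left (fun jv _ => ?_)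
  have hiff : (jv.1 ∈ ((g.filter (fun n => n != att_name && att_names.contains n)).map
        (fun n => (PySem.List.index? att_names n).getD 0)).map (fun n => (n : Int)))
      ↔ (jv.1 ∈ PySem.Set.ofList (((g.filter (fun n => n != att_name)).filter
          (fun n => att_names.contains n)).map
            (fun n => (((PySem.List.index? att_names n).getD 0 : Nat) : Int)))) := by
    simp [PySem.Set.mem_ofList, List.mem_map, List.mem_filter, and_assoc]
    constructor
    · rintro ⟨n, hg, hne, hm, he⟩
      exact ⟨n, hg, hm, hne, he.symm⟩
    · rintro ⟨n, hg, hm, hne, he⟩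
      exact ⟨n, hg, hne, hm, he.symm⟩
  simp only [hiff]

-- when att_name is in none of the four groups, both programs return att_batch.
theorem pv_notin (att_batch : List (List Int)) (att_name : String) (att_names : List String)
    (h1 : att_name ∉ pvGrpEye) (h2 : att_name ∉ pvGrpFace)
    (h3 : att_name ∉ pvGrpHair) (h4 : att_name ∉ pvGrpGls) :
    check_attribute_conflict att_batch att_name att_names = check_attribute_conflict_alt att_batch att_name att_names := by
  simp only [check_attribute_conflict, check_attribute_conflict_alt]
  have hcond : ¬ (((pvRPart att_name.toList).getD ([], att_name.toList)).1 ∈ pvStems ∧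
      ((pvRPart att_name.toList).getD ([], att_name.toList)).2 ∈ pvDigits) := by
    cases hp : pvRPart att_name.toList with
    | none =>
      rintro ⟨ha, -⟩
      simp only [Option.getD_none] at ha
      exact absurd ha (by decide)
    | some p =>
      obtain ⟨a, b⟩ := p
      rintro ⟨ha, hb⟩
      simp only [Option.getD_some] at ha hb
      have hrec := pvRPart_reconstruct _ _ _ hp
      fin_cases ha <;> fin_cases hb <;>
        (have hn := congrArg String.ofList hrec
         simp at hn
         subst hn
         first
           | exact h1 (by decide)
           | exact h2 (by decide)
           | exact h3 (by decide)
           | exact h4 (by decide))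
  rw [if_neg hcond]
  simp [h1, h2, h3, h4]

theorem pv_case_eye_color_0 (att_batch : List (List Int)) (att_names : List String) :
    check_attribute_conflict att_batch "eye_color_0" att_names = check_attribute_conflict_alt att_batch "eye_color_0" att_names := by
  simp only [check_attribute_conflict, check_attribute_conflict_alt]
  rw [show (pvRPart (String.toList "eye_color_0")).getD ([], String.toList "eye_color_0") = ("eye_color".toList, ['0']) from rfl]
  rw [if_pos (show "eye_color".toList ∈ pvStems ∧ (['0'] : List Char) ∈ pvDigits from by decide)]
  rw [show ((['0','1','2','3','4'].filter (fun d => [d] != (['0'] : List Char))).map (fun d => String.ofList ("eye_color".toList ++ '_' :: [d]))) = ["eye_color_1", "eye_color_2", "eye_color_3", "eye_color_4"] from rfl]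
  have hg0 : ("eye_color_0" : String) ∈ pvGrpEye := by decide
  have hg1 : ("eye_color_0" : String) ∉ pvGrpFace := by decide
  have hg2 : ("eye_color_0" : String) ∉ pvGrpHair := by decide
  have hg3 : ("eye_color_0" : String) ∉ pvGrpGls := by decide
  refine List.map_congr_left (fun att _ => ?_)
  by_cases hflag : att.getD ((PySem.List.index? att_names "eye_color_0").getD 0) 0 = 1
  · rw [if_pos (And.intro hg0 hflag), if_pos hflag]
    exact pvRow_eq att_names "eye_color_0" pvGrpEye ["eye_color_1", "eye_color_2", "eye_color_3", "eye_color_4"] (by decide) att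
  · rw [if_neg (fun hc => hflag hc.2), if_neg (fun hc => hg1 hc.1), if_neg (fun hc => hg2 hc.1), if_neg (fun hc => hg3 hc.1), if_neg hflag]

theorem pv_case_eye_color_1 (att_batch : List (List Int)) (att_names : List String) :
    check_attribute_conflict att_batch "eye_color_1" att_names = check_attribute_conflict_alt att_batch "eye_color_1" att_names := by
  simp only [check_attribute_conflict, check_attribute_conflict_alt]
  rw [show (pvRPart (String.toList "eye_color_1")).getD ([], String.toList "eye_color_1") = ("eye_color".toList, ['1']) from rfl]
  rw [if_pos (show "eye_color".toList ∈ pvStems ∧ (['1'] : List Char) ∈ pvDigits from by decide)]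
  rw [show ((['0','1','2','3','4'].filter (fun d => [d] != (['1'] : List Char))).map (fun d => String.ofList ("eye_color".toList ++ '_' :: [d]))) = ["eye_color_0", "eye_color_2", "eye_color_3", "eye_color_4"] from rfl]
  have hg0 : ("eye_color_1" : String) ∈ pvGrpEye := by decide
  have hg1 : ("eye_color_1" : String) ∉ pvGrpFace := by decide
  have hg2 : ("eye_color_1" : String) ∉ pvGrpHair := by decide
  have hg3 : ("eye_color_1" : String) ∉ pvGrpGls := by decide
  refine List.map_congr_left (fun att _ => ?_)
  by_cases hflag : att.getD ((PySem.List.index? att_names "eye_color_1").getD 0) 0 = 1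
  · rw [if_pos (And.intro hg0 hflag), if_pos hflag]
    exact pvRow_eq att_names "eye_color_1" pvGrpEye ["eye_color_0", "eye_color_2", "eye_color_3", "eye_color_4"] (by decide) att
  · rw [if_neg (fun hc => hflag hc.2), if_neg (fun hc => hg1 hc.1), if_neg (fun hc => hg2 hc.1), if_neg (fun hc => hg3 hc.1), if_neg hflag]

theorem pv_case_eye_color_2 (att_batch : List (List Int)) (att_names : List String) :
    check_attribute_conflict att_batch "eye_color_2" att_names = check_attribute_conflict_alt att_batch "eye_color_2" att_names := by
  simp only [check_attribute_conflict, check_attribute_conflict_alt]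
  rw [show (pvRPart (String.toList "eye_color_2")).getD ([], String.toList "eye_color_2") = ("eye_color".toList, ['2']) from rfl]
  rw [if_pos (show "eye_color".toList ∈ pvStems ∧ (['2'] : List Char) ∈ pvDigits from by decide)]
  rw [show ((['0','1','2','3','4'].filter (fun d => [d] != (['2'] : List Char))).map (fun d => String.ofList ("eye_color".toList ++ '_' :: [d]))) = ["eye_color_0", "eye_color_1", "eye_color_3", "eye_color_4"] from rfl]
  have hg0 : ("eye_color_2" : String) ∈ pvGrpEye := by decide
  have hg1 : ("eye_color_2" : String) ∉ pvGrpFace := by decide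
  have hg2 : ("eye_color_2" : String) ∉ pvGrpHair := by decide
  have hg3 : ("eye_color_2" : String) ∉ pvGrpGls := by decide
  refine List.map_congr_left (fun att _ => ?_)
  by_cases hflag : att.getD ((PySem.List.index? att_names "eye_color_2").getD 0) 0 = 1
  · rw [if_pos (And.intro hg0 hflag), if_pos hflag]
    exact pvRow_eq att_names "eye_color_2" pvGrpEye ["eye_color_0", "eye_color_1", "eye_color_3", "eye_color_4"] (by decide) att
  · rw [if_neg (fun hc => hflag hc.2), if_neg (fun hc => hg1 hc.1), if_neg (fun hc => hg2 hc.1), if_neg (fun hc => hg3 hc.1), if_neg hflag]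

theorem pv_case_eye_color_3 (att_batch : List (List Int)) (att_names : List String) :
    check_attribute_conflict att_batch "eye_color_3" att_names = check_attribute_conflict_alt att_batch "eye_color_3" att_names := by
  simp only [check_attribute_conflict, check_attribute_conflict_alt]
  rw [show (pvRPart (String.toList "eye_color_3")).getD ([], String.toList "eye_color_3") = ("eye_color".toList, ['3']) from rfl]
  rw [if_pos (show "eye_color".toList ∈ pvStems ∧ (['3'] : List Char) ∈ pvDigits from by decide)]
  rw [show ((['0','1','2','3','4'].filter (fun d => [d] != (['3'] : List Char))).map (fun d => String.ofList ("eye_color".toList ++ '_' :: [d]))) = ["eye_color_0", "eye_color_1", "eye_color_2", "eye_color_4"] from rfl]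
  have hg0 : ("eye_color_3" : String) ∈ pvGrpEye := by decide
  have hg1 : ("eye_color_3" : String) ∉ pvGrpFace := by decide
  have hg2 : ("eye_color_3" : String) ∉ pvGrpHair := by decide
  have hg3 : ("eye_color_3" : String) ∉ pvGrpGls := by decide
  refine List.map_congr_left (fun att _ => ?_)
  by_cases hflag : att.getD ((PySem.List.index? att_names "eye_color_3").getD 0) 0 = 1
  · rw [if_pos (And.intro hg0 hflag), if_pos hflag]
    exact pvRow_eq att_names "eye_color_3" pvGrpEye ["eye_color_0", "eye_color_1", "eye_color_2", "eye_color_4"] (by decide) att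
  · rw [if_neg (fun hc => hflag hc.2), if_neg (fun hc => hg1 hc.1), if_neg (fun hc => hg2 hc.1), if_neg (fun hc => hg3 hc.1), if_neg hflag]

theorem pv_case_eye_color_4 (att_batch : List (List Int)) (att_names : List String) :
    check_attribute_conflict att_batch "eye_color_4" att_names = check_attribute_conflict_alt att_batch "eye_color_4" att_names := by
  simp only [check_attribute_conflict, check_attribute_conflict_alt]
  rw [show (pvRPart (String.toList "eye_color_4")).getD ([], String.toList "eye_color_4") = ("eye_color".toList, ['4']) from rfl]
  rw [if_pos (show "eye_color".toList ∈ pvStems ∧ (['4'] : List Char) ∈ pvDigits from by decide)]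
  rw [show ((['0','1','2','3','4'].filter (fun d => [d] != (['4'] : List Char))).map (fun d => String.ofList ("eye_color".toList ++ '_' :: [d]))) = ["eye_color_0", "eye_color_1", "eye_color_2", "eye_color_3"] from rfl]
  have hg0 : ("eye_color_4" : String) ∈ pvGrpEye := by decide
  have hg1 : ("eye_color_4" : String) ∉ pvGrpFace := by decide
  have hg2 : ("eye_color_4" : String) ∉ pvGrpHair := by decide
  have hg3 : ("eye_color_4" : String) ∉ pvGrpGls := by decide
  refine List.map_congr_left (fun att _ => ?_)
  by_cases hflag : att.getD ((PySem.List.index? att_names "eye_color_4").getD 0) 0 = 1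
  · rw [if_pos (And.intro hg0 hflag), if_pos hflag]
    exact pvRow_eq att_names "eye_color_4" pvGrpEye ["eye_color_0", "eye_color_1", "eye_color_2", "eye_color_3"] (by decide) att
  · rw [if_neg (fun hc => hflag hc.2), if_neg (fun hc => hg1 hc.1), if_neg (fun hc => hg2 hc.1), if_neg (fun hc => hg3 hc.1), if_neg hflag]

theorem pv_case_face_color_0 (att_batch : List (List Int)) (att_names : List String) :
    check_attribute_conflict att_batch "face_color_0" att_names = check_attribute_conflict_alt att_batch "face_color_0" att_names := by
  simp only [check_attribute_conflict, check_attribute_conflict_alt]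
  rw [show (pvRPart (String.toList "face_color_0")).getD ([], String.toList "face_color_0") = ("face_color".toList, ['0']) from rfl]
  rw [if_pos (show "face_color".toList ∈ pvStems ∧ (['0'] : List Char) ∈ pvDigits from by decide)]
  rw [show ((['0','1','2','3','4'].filter (fun d => [d] != (['0'] : List Char))).map (fun d => String.ofList ("face_color".toList ++ '_' :: [d]))) = ["face_color_1", "face_color_2", "face_color_3", "face_color_4"] from rfl]
  have hg0 : ("face_color_0" : String) ∉ pvGrpEye := by decide
  have hg1 : ("face_color_0" : String) ∈ pvGrpFace := by decide
  have hg2 : ("face_color_0" : String) ∉ pvGrpHair := by decide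
  have hg3 : ("face_color_0" : String) ∉ pvGrpGls := by decide
  refine List.map_congr_left (fun att _ => ?_)
  by_cases hflag : att.getD ((PySem.List.index? att_names "face_color_0").getD 0) 0 = 1
  · rw [if_neg (fun hc => hg0 hc.1), if_pos (And.intro hg1 hflag), if_pos hflag]
    exact pvRow_eq att_names "face_color_0" pvGrpFace ["face_color_1", "face_color_2", "face_color_3", "face_color_4"] (by decide) att
  · rw [if_neg (fun hc => hg0 hc.1), if_neg (fun hc => hflag hc.2), if_neg (fun hc => hg2 hc.1), if_neg (fun hc => hg3 hc.1), if_neg hflag]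

theorem pv_case_face_color_1 (att_batch : List (List Int)) (att_names : List String) :
    check_attribute_conflict att_batch "face_color_1" att_names = check_attribute_conflict_alt att_batch "face_color_1" att_names := by
  simp only [check_attribute_conflict, check_attribute_conflict_alt]
  rw [show (pvRPart (String.toList "face_color_1")).getD ([], String.toList "face_color_1") = ("face_color".toList, ['1']) from rfl]
  rw [if_pos (show "face_color".toList ∈ pvStems ∧ (['1'] : List Char) ∈ pvDigits from by decide)]
  rw [show ((['0','1','2','3','4'].filter (fun d => [d] != (['1'] : List Char))).map (fun d => String.ofList ("face_color".toList ++ '_' :: [d]))) = ["face_color_0", "face_color_2", "face_color_3", "face_color_4"] from rfl]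
  have hg0 : ("face_color_1" : String) ∉ pvGrpEye := by decide
  have hg1 : ("face_color_1" : String) ∈ pvGrpFace := by decide
  have hg2 : ("face_color_1" : String) ∉ pvGrpHair := by decide
  have hg3 : ("face_color_1" : String) ∉ pvGrpGls := by decide
  refine List.map_congr_left (fun att _ => ?_)
  by_cases hflag : att.getD ((PySem.List.index? att_names "face_color_1").getD 0) 0 = 1
  · rw [if_neg (fun hc => hg0 hc.1), if_pos (And.intro hg1 hflag), if_pos hflag]
    exact pvRow_eq att_names "face_color_1" pvGrpFace ["face_color_0", "face_color_2", "face_color_3", "face_color_4"] (by decide) att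
  · rw [if_neg (fun hc => hg0 hc.1), if_neg (fun hc => hflag hc.2), if_neg (fun hc => hg2 hc.1), if_neg (fun hc => hg3 hc.1), if_neg hflag]

theorem pv_case_face_color_2 (att_batch : List (List Int)) (att_names : List String) :
    check_attribute_conflict att_batch "face_color_2" att_names = check_attribute_conflict_alt att_batch "face_color_2" att_names := by
  simp only [check_attribute_conflict, check_attribute_conflict_alt]
  rw [show (pvRPart (String.toList "face_color_2")).getD ([], String.toList "face_color_2") = ("face_color".toList, ['2']) from rfl]
  rw [if_pos (show "face_color".toList ∈ pvStems ∧ (['2'] : List Char) ∈ pvDigits from by decide)]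
  rw [show ((['0','1','2','3','4'].filter (fun d => [d] != (['2'] : List Char))).map (fun d => String.ofList ("face_color".toList ++ '_' :: [d]))) = ["face_color_0", "face_color_1", "face_color_3", "face_color_4"] from rfl]
  have hg0 : ("face_color_2" : String) ∉ pvGrpEye := by decide
  have hg1 : ("face_color_2" : String) ∈ pvGrpFace := by decide
  have hg2 : ("face_color_2" : String) ∉ pvGrpHair := by decide
  have hg3 : ("face_color_2" : String) ∉ pvGrpGls := by decide
  refine List.map_congr_left (fun att _ => ?_)
  by_cases hflag : att.getD ((PySem.List.index? att_names "face_color_2").getD 0) 0 = 1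
  · rw [if_neg (fun hc => hg0 hc.1), if_pos (And.intro hg1 hflag), if_pos hflag]
    exact pvRow_eq att_names "face_color_2" pvGrpFace ["face_color_0", "face_color_1", "face_color_3", "face_color_4"] (by decide) att
  · rw [if_neg (fun hc => hg0 hc.1), if_neg (fun hc => hflag hc.2), if_neg (fun hc => hg2 hc.1), if_neg (fun hc => hg3 hc.1), if_neg hflag]

theorem pv_case_face_color_3 (att_batch : List (List Int)) (att_names : List String) :
    check_attribute_conflict att_batch "face_color_3" att_names = check_attribute_conflict_alt att_batch "face_color_3" att_names := by
  simp only [check_attribute_conflict, check_attribute_conflict_alt]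
  rw [show (pvRPart (String.toList "face_color_3")).getD ([], String.toList "face_color_3") = ("face_color".toList, ['3']) from rfl]
  rw [if_pos (show "face_color".toList ∈ pvStems ∧ (['3'] : List Char) ∈ pvDigits from by decide)]
  rw [show ((['0','1','2','3','4'].filter (fun d => [d] != (['3'] : List Char))).map (fun d => String.ofList ("face_color".toList ++ '_' :: [d]))) = ["face_color_0", "face_color_1", "face_color_2", "face_color_4"] from rfl]
  have hg0 : ("face_color_3" : String) ∉ pvGrpEye := by decide
  have hg1 : ("face_color_3" : String) ∈ pvGrpFace := by decide
  have hg2 : ("face_color_3" : String) ∉ pvGrpHair := by decide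
  have hg3 : ("face_color_3" : String) ∉ pvGrpGls := by decide
  refine List.map_congr_left (fun att _ => ?_)
  by_cases hflag : att.getD ((PySem.List.index? att_names "face_color_3").getD 0) 0 = 1
  · rw [if_neg (fun hc => hg0 hc.1), if_pos (And.intro hg1 hflag), if_pos hflag]
    exact pvRow_eq att_names "face_color_3" pvGrpFace ["face_color_0", "face_color_1", "face_color_2", "face_color_4"] (by decide) att
  · rw [if_neg (fun hc => hg0 hc.1), if_neg (fun hc => hflag hc.2), if_neg (fun hc => hg2 hc.1), if_neg (fun hc => hg3 hc.1), if_neg hflag]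

theorem pv_case_face_color_4 (att_batch : List (List Int)) (att_names : List String) :
    check_attribute_conflict att_batch "face_color_4" att_names = check_attribute_conflict_alt att_batch "face_color_4" att_names := by
  simp only [check_attribute_conflict, check_attribute_conflict_alt]
  rw [show (pvRPart (String.toList "face_color_4")).getD ([], String.toList "face_color_4") = ("face_color".toList, ['4']) from rfl]
  rw [if_pos (show "face_color".toList ∈ pvStems ∧ (['4'] : List Char) ∈ pvDigits from by decide)]
  rw [show ((['0','1','2','3','4'].filter (fun d => [d] != (['4'] : List Char))).map (fun d => String.ofList ("face_color".toList ++ '_' :: [d]))) = ["face_color_0", "face_color_1", "face_color_2", "face_color_3"] from rfl]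
  have hg0 : ("face_color_4" : String) ∉ pvGrpEye := by decide
  have hg1 : ("face_color_4" : String) ∈ pvGrpFace := by decide
  have hg2 : ("face_color_4" : String) ∉ pvGrpHair := by decide
  have hg3 : ("face_color_4" : String) ∉ pvGrpGls := by decide
  refine List.map_congr_left (fun att _ => ?_)
  by_cases hflag : att.getD ((PySem.List.index? att_names "face_color_4").getD 0) 0 = 1
  · rw [if_neg (fun hc => hg0 hc.1), if_pos (And.intro hg1 hflag), if_pos hflag]
    exact pvRow_eq att_names "face_color_4" pvGrpFace ["face_color_0", "face_color_1", "face_color_2", "face_color_3"] (by decide) att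
  · rw [if_neg (fun hc => hg0 hc.1), if_neg (fun hc => hflag hc.2), if_neg (fun hc => hg2 hc.1), if_neg (fun hc => hg3 hc.1), if_neg hflag]

theorem pv_case_hair_color_0 (att_batch : List (List Int)) (att_names : List String) :
    check_attribute_conflict att_batch "hair_color_0" att_names = check_attribute_conflict_alt att_batch "hair_color_0" att_names := by
  simp only [check_attribute_conflict, check_attribute_conflict_alt]
  rw [show (pvRPart (String.toList "hair_color_0")).getD ([], String.toList "hair_color_0") = ("hair_color".toList, ['0']) from rfl]
  rw [if_pos (show "hair_color".toList ∈ pvStems ∧ (['0'] : List Char) ∈ pvDigits from by decide)]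
  rw [show ((['0','1','2','3','4'].filter (fun d => [d] != (['0'] : List Char))).map (fun d => String.ofList ("hair_color".toList ++ '_' :: [d]))) = ["hair_color_1", "hair_color_2", "hair_color_3", "hair_color_4"] from rfl]
  have hg0 : ("hair_color_0" : String) ∉ pvGrpEye := by decide
  have hg1 : ("hair_color_0" : String) ∉ pvGrpFace := by decide
  have hg2 : ("hair_color_0" : String) ∈ pvGrpHair := by decide
  have hg3 : ("hair_color_0" : String) ∉ pvGrpGls := by decide
  refine List.map_congr_left (fun att _ => ?_)
  by_cases hflag : att.getD ((PySem.List.index? att_names "hair_color_0").getD 0) 0 = 1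
  · rw [if_neg (fun hc => hg0 hc.1), if_neg (fun hc => hg1 hc.1), if_pos (And.intro hg2 hflag), if_pos hflag]
    exact pvRow_eq att_names "hair_color_0" pvGrpHair ["hair_color_1", "hair_color_2", "hair_color_3", "hair_color_4"] (by decide) att
  · rw [if_neg (fun hc => hg0 hc.1), if_neg (fun hc => hg1 hc.1), if_neg (fun hc => hflag hc.2), if_neg (fun hc => hg3 hc.1), if_neg hflag]

theorem pv_case_hair_color_1 (att_batch : List (List Int)) (att_names : List String) :
    check_attribute_conflict att_batch "hair_color_1" att_names = check_attribute_conflict_alt att_batch "hair_color_1" att_names := by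
  simp only [check_attribute_conflict, check_attribute_conflict_alt]
  rw [show (pvRPart (String.toList "hair_color_1")).getD ([], String.toList "hair_color_1") = ("hair_color".toList, ['1']) from rfl]
  rw [if_pos (show "hair_color".toList ∈ pvStems ∧ (['1'] : List Char) ∈ pvDigits from by decide)]
  rw [show ((['0','1','2','3','4'].filter (fun d => [d] != (['1'] : List Char))).map (fun d => String.ofList ("hair_color".toList ++ '_' :: [d]))) = ["hair_color_0", "hair_color_2", "hair_color_3", "hair_color_4"] from rfl]
  have hg0 : ("hair_color_1" : String) ∉ pvGrpEye := by decide
  have hg1 : ("hair_color_1" : String) ∉ pvGrpFace := by decide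
  have hg2 : ("hair_color_1" : String) ∈ pvGrpHair := by decide
  have hg3 : ("hair_color_1" : String) ∉ pvGrpGls := by decide
  refine List.map_congr_left (fun att _ => ?_)
  by_cases hflag : att.getD ((PySem.List.index? att_names "hair_color_1").getD 0) 0 = 1
  · rw [if_neg (fun hc => hg0 hc.1), if_neg (fun hc => hg1 hc.1), if_pos (And.intro hg2 hflag), if_pos hflag]
    exact pvRow_eq att_names "hair_color_1" pvGrpHair ["hair_color_0", "hair_color_2", "hair_color_3", "hair_color_4"] (by decide) att
  · rw [if_neg (fun hc => hg0 hc.1), if_neg (fun hc => hg1 hc.1), if_neg (fun hc => hflag hc.2), if_neg (fun hc => hg3 hc.1), if_neg hflag]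

theorem pv_case_hair_color_2 (att_batch : List (List Int)) (att_names : List String) :
    check_attribute_conflict att_batch "hair_color_2" att_names = check_attribute_conflict_alt att_batch "hair_color_2" att_names := by
  simp only [check_attribute_conflict, check_attribute_conflict_alt]
  rw [show (pvRPart (String.toList "hair_color_2")).getD ([], String.toList "hair_color_2") = ("hair_color".toList, ['2']) from rfl]
  rw [if_pos (show "hair_color".toList ∈ pvStems ∧ (['2'] : List Char) ∈ pvDigits from by decide)]
  rw [show ((['0','1','2','3','4'].filter (fun d => [d] != (['2'] : List Char))).map (fun d => String.ofList ("hair_color".toList ++ '_' :: [d]))) = ["hair_color_0", "hair_color_1", "hair_color_3", "hair_color_4"] from rfl]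
  have hg0 : ("hair_color_2" : String) ∉ pvGrpEye := by decide
  have hg1 : ("hair_color_2" : String) ∉ pvGrpFace := by decide
  have hg2 : ("hair_color_2" : String) ∈ pvGrpHair := by decide
  have hg3 : ("hair_color_2" : String) ∉ pvGrpGls := by decide
  refine List.map_congr_left (fun att _ => ?_)
  by_cases hflag : att.getD ((PySem.List.index? att_names "hair_color_2").getD 0) 0 = 1
  · rw [if_neg (fun hc => hg0 hc.1), if_neg (fun hc => hg1 hc.1), if_pos (And.intro hg2 hflag), if_pos hflag]
    exact pvRow_eq att_names "hair_color_2" pvGrpHair ["hair_color_0", "hair_color_1", "hair_color_3", "hair_color_4"] (by decide) att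
  · rw [if_neg (fun hc => hg0 hc.1), if_neg (fun hc => hg1 hc.1), if_neg (fun hc => hflag hc.2), if_neg (fun hc => hg3 hc.1), if_neg hflag]

theorem pv_case_hair_color_3 (att_batch : List (List Int)) (att_names : List String) :
    check_attribute_conflict att_batch "hair_color_3" att_names = check_attribute_conflict_alt att_batch "hair_color_3" att_names := by
  simp only [check_attribute_conflict, check_attribute_conflict_alt]
  rw [show (pvRPart (String.toList "hair_color_3")).getD ([], String.toList "hair_color_3") = ("hair_color".toList, ['3']) from rfl]
  rw [if_pos (show "hair_color".toList ∈ pvStems ∧ (['3'] : List Char) ∈ pvDigits from by decide)]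
  rw [show ((['0','1','2','3','4'].filter (fun d => [d] != (['3'] : List Char))).map (fun d => String.ofList ("hair_color".toList ++ '_' :: [d]))) = ["hair_color_0", "hair_color_1", "hair_color_2", "hair_color_4"] from rfl]
  have hg0 : ("hair_color_3" : String) ∉ pvGrpEye := by decide
  have hg1 : ("hair_color_3" : String) ∉ pvGrpFace := by decide
  have hg2 : ("hair_color_3" : String) ∈ pvGrpHair := by decide
  have hg3 : ("hair_color_3" : String) ∉ pvGrpGls := by decide
  refine List.map_congr_left (fun att _ => ?_)
  by_cases hflag : att.getD ((PySem.List.index? att_names "hair_color_3").getD 0) 0 = 1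
  · rw [if_neg (fun hc => hg0 hc.1), if_neg (fun hc => hg1 hc.1), if_pos (And.intro hg2 hflag), if_pos hflag]
    exact pvRow_eq att_names "hair_color_3" pvGrpHair ["hair_color_0", "hair_color_1", "hair_color_2", "hair_color_4"] (by decide) att
  · rw [if_neg (fun hc => hg0 hc.1), if_neg (fun hc => hg1 hc.1), if_neg (fun hc => hflag hc.2), if_neg (fun hc => hg3 hc.1), if_neg hflag]

theorem pv_case_hair_color_4 (att_batch : List (List Int)) (att_names : List String) :
    check_attribute_conflict att_batch "hair_color_4" att_names = check_attribute_conflict_alt att_batch "hair_color_4" att_names := by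
  simp only [check_attribute_conflict, check_attribute_conflict_alt]
  rw [show (pvRPart (String.toList "hair_color_4")).getD ([], String.toList "hair_color_4") = ("hair_color".toList, ['4']) from rfl]
  rw [if_pos (show "hair_color".toList ∈ pvStems ∧ (['4'] : List Char) ∈ pvDigits from by decide)]
  rw [show ((['0','1','2','3','4'].filter (fun d => [d] != (['4'] : List Char))).map (fun d => String.ofList ("hair_color".toList ++ '_' :: [d]))) = ["hair_color_0", "hair_color_1", "hair_color_2", "hair_color_3"] from rfl]
  have hg0 : ("hair_color_4" : String) ∉ pvGrpEye := by decide
  have hg1 : ("hair_color_4" : String) ∉ pvGrpFace := by decide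
  have hg2 : ("hair_color_4" : String) ∈ pvGrpHair := by decide
  have hg3 : ("hair_color_4" : String) ∉ pvGrpGls := by decide
  refine List.map_congr_left (fun att _ => ?_)
  by_cases hflag : att.getD ((PySem.List.index? att_names "hair_color_4").getD 0) 0 = 1
  · rw [if_neg (fun hc => hg0 hc.1), if_neg (fun hc => hg1 hc.1), if_pos (And.intro hg2 hflag), if_pos hflag]
    exact pvRow_eq att_names "hair_color_4" pvGrpHair ["hair_color_0", "hair_color_1", "hair_color_2", "hair_color_3"] (by decide) att
  · rw [if_neg (fun hc => hg0 hc.1), if_neg (fun hc => hg1 hc.1), if_neg (fun hc => hflag hc.2), if_neg (fun hc => hg3 hc.1), if_neg hflag]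

theorem pv_case_glasses_0 (att_batch : List (List Int)) (att_names : List String) :
    check_attribute_conflict att_batch "glasses_0" att_names = check_attribute_conflict_alt att_batch "glasses_0" att_names := by
  simp only [check_attribute_conflict, check_attribute_conflict_alt]
  rw [show (pvRPart (String.toList "glasses_0")).getD ([], String.toList "glasses_0") = ("glasses".toList, ['0']) from rfl]
  rw [if_pos (show "glasses".toList ∈ pvStems ∧ (['0'] : List Char) ∈ pvDigits from by decide)]
  rw [show ((['0','1','2','3','4'].filter (fun d => [d] != (['0'] : List Char))).map (fun d => String.ofList ("glasses".toList ++ '_' :: [d]))) = ["glasses_1", "glasses_2", "glasses_3", "glasses_4"] from rfl]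
  have hg0 : ("glasses_0" : String) ∉ pvGrpEye := by decide
  have hg1 : ("glasses_0" : String) ∉ pvGrpFace := by decide
  have hg2 : ("glasses_0" : String) ∉ pvGrpHair := by decide
  have hg3 : ("glasses_0" : String) ∈ pvGrpGls := by decide
  refine List.map_congr_left (fun att _ => ?_)
  by_cases hflag : att.getD ((PySem.List.index? att_names "glasses_0").getD 0) 0 = 1
  · rw [if_neg (fun hc => hg0 hc.1), if_neg (fun hc => hg1 hc.1), if_neg (fun hc => hg2 hc.1), if_pos (And.intro hg3 hflag), if_pos hflag]
    exact pvRow_eq att_names "glasses_0" pvGrpGls ["glasses_1", "glasses_2", "glasses_3", "glasses_4"] (by decide) att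
  · rw [if_neg (fun hc => hg0 hc.1), if_neg (fun hc => hg1 hc.1), if_neg (fun hc => hg2 hc.1), if_neg (fun hc => hflag hc.2), if_neg hflag]

theorem pv_case_glasses_1 (att_batch : List (List Int)) (att_names : List String) :
    check_attribute_conflict att_batch "glasses_1" att_names = check_attribute_conflict_alt att_batch "glasses_1" att_names := by
  simp only [check_attribute_conflict, check_attribute_conflict_alt]
  rw [show (pvRPart (String.toList "glasses_1")).getD ([], String.toList "glasses_1") = ("glasses".toList, ['1']) from rfl]
  rw [if_pos (show "glasses".toList ∈ pvStems ∧ (['1'] : List Char) ∈ pvDigits from by decide)]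
  rw [show ((['0','1','2','3','4'].filter (fun d => [d] != (['1'] : List Char))).map (fun d => String.ofList ("glasses".toList ++ '_' :: [d]))) = ["glasses_0", "glasses_2", "glasses_3", "glasses_4"] from rfl]
  have hg0 : ("glasses_1" : String) ∉ pvGrpEye := by decide
  have hg1 : ("glasses_1" : String) ∉ pvGrpFace := by decide
  have hg2 : ("glasses_1" : String) ∉ pvGrpHair := by decide
  have hg3 : ("glasses_1" : String) ∈ pvGrpGls := by decide
  refine List.map_congr_left (fun att _ => ?_)
  by_cases hflag : att.getD ((PySem.List.index? att_names "glasses_1").getD 0) 0 = 1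
  · rw [if_neg (fun hc => hg0 hc.1), if_neg (fun hc => hg1 hc.1), if_neg (fun hc => hg2 hc.1), if_pos (And.intro hg3 hflag), if_pos hflag]
    exact pvRow_eq att_names "glasses_1" pvGrpGls ["glasses_0", "glasses_2", "glasses_3", "glasses_4"] (by decide) att
  · rw [if_neg (fun hc => hg0 hc.1), if_neg (fun hc => hg1 hc.1), if_neg (fun hc => hg2 hc.1), if_neg (fun hc => hflag hc.2), if_neg hflag]

theorem pv_case_glasses_2 (att_batch : List (List Int)) (att_names : List String) :
    check_attribute_conflict att_batch "glasses_2" att_names = check_attribute_conflict_alt att_batch "glasses_2" att_names := by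
  simp only [check_attribute_conflict, check_attribute_conflict_alt]
  rw [show (pvRPart (String.toList "glasses_2")).getD ([], String.toList "glasses_2") = ("glasses".toList, ['2']) from rfl]
  rw [if_pos (show "glasses".toList ∈ pvStems ∧ (['2'] : List Char) ∈ pvDigits from by decide)]
  rw [show ((['0','1','2','3','4'].filter (fun d => [d] != (['2'] : List Char))).map (fun d => String.ofList ("glasses".toList ++ '_' :: [d]))) = ["glasses_0", "glasses_1", "glasses_3", "glasses_4"] from rfl]
  have hg0 : ("glasses_2" : String) ∉ pvGrpEye := by decide
  have hg1 : ("glasses_2" : String) ∉ pvGrpFace := by decide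
  have hg2 : ("glasses_2" : String) ∉ pvGrpHair := by decide
  have hg3 : ("glasses_2" : String) ∈ pvGrpGls := by decide
  refine List.map_congr_left (fun att _ => ?_)
  by_cases hflag : att.getD ((PySem.List.index? att_names "glasses_2").getD 0) 0 = 1
  · rw [if_neg (fun hc => hg0 hc.1), if_neg (fun hc => hg1 hc.1), if_neg (fun hc => hg2 hc.1), if_pos (And.intro hg3 hflag), if_pos hflag]
    exact pvRow_eq att_names "glasses_2" pvGrpGls ["glasses_0", "glasses_1", "glasses_3", "glasses_4"] (by decide) att
  · rw [if_neg (fun hc => hg0 hc.1), if_neg (fun hc => hg1 hc.1), if_neg (fun hc => hg2 hc.1), if_neg (fun hc => hflag hc.2), if_neg hflag]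

theorem pv_case_glasses_3 (att_batch : List (List Int)) (att_names : List String) :
    check_attribute_conflict att_batch "glasses_3" att_names = check_attribute_conflict_alt att_batch "glasses_3" att_names := by
  simp only [check_attribute_conflict, check_attribute_conflict_alt]
  rw [show (pvRPart (String.toList "glasses_3")).getD ([], String.toList "glasses_3") = ("glasses".toList, ['3']) from rfl]
  rw [if_pos (show "glasses".toList ∈ pvStems ∧ (['3'] : List Char) ∈ pvDigits from by decide)]
  rw [show ((['0','1','2','3','4'].filter (fun d => [d] != (['3'] : List Char))).map (fun d => String.ofList ("glasses".toList ++ '_' :: [d]))) = ["glasses_0", "glasses_1", "glasses_2", "glasses_4"] from rfl]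
  have hg0 : ("glasses_3" : String) ∉ pvGrpEye := by decide
  have hg1 : ("glasses_3" : String) ∉ pvGrpFace := by decide
  have hg2 : ("glasses_3" : String) ∉ pvGrpHair := by decide
  have hg3 : ("glasses_3" : String) ∈ pvGrpGls := by decide
  refine List.map_congr_left (fun att _ => ?_)
  by_cases hflag : att.getD ((PySem.List.index? att_names "glasses_3").getD 0) 0 = 1
  · rw [if_neg (fun hc => hg0 hc.1), if_neg (fun hc => hg1 hc.1), if_neg (fun hc => hg2 hc.1), if_pos (And.intro hg3 hflag), if_pos hflag]
    exact pvRow_eq att_names "glasses_3" pvGrpGls ["glasses_0", "glasses_1", "glasses_2", "glasses_4"] (by decide) att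
  · rw [if_neg (fun hc => hg0 hc.1), if_neg (fun hc => hg1 hc.1), if_neg (fun hc => hg2 hc.1), if_neg (fun hc => hflag hc.2), if_neg hflag]

theorem pv_case_glasses_4 (att_batch : List (List Int)) (att_names : List String) :
    check_attribute_conflict att_batch "glasses_4" att_names = check_attribute_conflict_alt att_batch "glasses_4" att_names := by
  simp only [check_attribute_conflict, check_attribute_conflict_alt]
  rw [show (pvRPart (String.toList "glasses_4")).getD ([], String.toList "glasses_4") = ("glasses".toList, ['4']) from rfl]
  rw [if_pos (show "glasses".toList ∈ pvStems ∧ (['4'] : List Char) ∈ pvDigits from by decide)]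
  rw [show ((['0','1','2','3','4'].filter (fun d => [d] != (['4'] : List Char))).map (fun d => String.ofList ("glasses".toList ++ '_' :: [d]))) = ["glasses_0", "glasses_1", "glasses_2", "glasses_3"] from rfl]
  have hg0 : ("glasses_4" : String) ∉ pvGrpEye := by decide
  have hg1 : ("glasses_4" : String) ∉ pvGrpFace := by decide
  have hg2 : ("glasses_4" : String) ∉ pvGrpHair := by decide
  have hg3 : ("glasses_4" : String) ∈ pvGrpGls := by decide
  refine List.map_congr_left (fun att _ => ?_)
  by_cases hflag : att.getD ((PySem.List.index? att_names "glasses_4").getD 0) 0 = 1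
  · rw [if_neg (fun hc => hg0 hc.1), if_neg (fun hc => hg1 hc.1), if_neg (fun hc => hg2 hc.1), if_pos (And.intro hg3 hflag), if_pos hflag]
    exact pvRow_eq att_names "glasses_4" pvGrpGls ["glasses_0", "glasses_1", "glasses_2", "glasses_3"] (by decide) att
  · rw [if_neg (fun hc => hg0 hc.1), if_neg (fun hc => hg1 hc.1), if_neg (fun hc => hg2 hc.1), if_neg (fun hc => hflag hc.2), if_neg hflag]

theorem pv_main (att_batch : List (List Int)) (att_name : String) (att_names : List String) :
    check_attribute_conflict att_batch att_name att_names = check_attribute_conflict_alt att_batch att_name att_names := by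
  by_cases h1 : att_name ∈ pvGrpEye
  · fin_cases h1 <;> first | exact pv_case_eye_color_0 att_batch att_names | exact pv_case_eye_color_1 att_batch att_names | exact pv_case_eye_color_2 att_batch att_names | exact pv_case_eye_color_3 att_batch att_names | exact pv_case_eye_color_4 att_batch att_names
  · by_cases h2 : att_name ∈ pvGrpFace
    · fin_cases h2 <;> first | exact pv_case_face_color_0 att_batch att_names | exact pv_case_face_color_1 att_batch att_names | exact pv_case_face_color_2 att_batch att_names | exact pv_case_face_color_3 att_batch att_names | exact pv_case_face_color_4 att_batch att_names
    · by_cases h3 : att_name ∈ pvGrpHair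
      · fin_cases h3 <;> first | exact pv_case_hair_color_0 att_batch att_names | exact pv_case_hair_color_1 att_batch att_names | exact pv_case_hair_color_2 att_batch att_names | exact pv_case_hair_color_3 att_batch att_names | exact pv_case_hair_color_4 att_batch att_names
      · by_cases h4 : att_name ∈ pvGrpGls
        · fin_cases h4 <;> first | exact pv_case_glasses_0 att_batch att_names | exact pv_case_glasses_1 att_batch att_names | exact pv_case_glasses_2 att_batch att_names | exact pv_case_glasses_3 att_batch att_names | exact pv_case_glasses_4 att_batch att_names
        · exact pv_notin att_batch att_name att_names h1 h2 h3 h4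

-- ===== VERDICT (by name: the statement is the Claim_ definition above) =====
theorem check_attribute_conflict_spec : Claim_equal_check_attribute_conflict := by
  intro att_batch att_name att_names _ _
  unfold Spec_check_attribute_conflict
  exact pv_main att_batch att_name att_names
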